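-- pv_equiv track=rewrite | github.com/mpcodez/AI | USACO/2.2.py | solve_test_case
-- ===== SOURCE A (Python) =====
-- def solve_test_case(N, cows):
--     hay_count = {}
--     for hay in cows:
--         if hay not in hay_count:
--             hay_count[hay] = 1
--         else:
--             hay_count[hay] += 1
--
--     half_threshold = (N // 2) + 1
--     possible_hays = []
--     for hay, count in hay_count.items():
--         if count >= half_threshold:
--             possible_hays.append(hay)
--
--     if len(possible_hays) == 0:
--         return [-1]
--     else:
--         return sorted(possible_hays)
-- ===== SOURCE B (Python) =====
-- def solve_test_case(N, cows):
--     threshold = (N // 2) + 1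
--     s = sorted(cows)
--     result = []
--     i = 0
--     n = len(s)
--     while i < n:
--         j = i + 1
--         while j < n and s[j] == s[i]:
--             j += 1
--         if j - i >= threshold:
--             result.append(s[i])
--         i = j
--     return result if result else [-1]
-- ===== Notes on version B (the rewrite author's own statement) =====
-- stated objective: alternative
-- what changed: Replaces the hash-count table plus filter plus final sort with a sort-first single pass that scans runs of equal values in the sorted copy and collects those whose run length reaches the majority threshold, so the result is emitted already in ascending order with no dict and no final sort.
import Mathlib
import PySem

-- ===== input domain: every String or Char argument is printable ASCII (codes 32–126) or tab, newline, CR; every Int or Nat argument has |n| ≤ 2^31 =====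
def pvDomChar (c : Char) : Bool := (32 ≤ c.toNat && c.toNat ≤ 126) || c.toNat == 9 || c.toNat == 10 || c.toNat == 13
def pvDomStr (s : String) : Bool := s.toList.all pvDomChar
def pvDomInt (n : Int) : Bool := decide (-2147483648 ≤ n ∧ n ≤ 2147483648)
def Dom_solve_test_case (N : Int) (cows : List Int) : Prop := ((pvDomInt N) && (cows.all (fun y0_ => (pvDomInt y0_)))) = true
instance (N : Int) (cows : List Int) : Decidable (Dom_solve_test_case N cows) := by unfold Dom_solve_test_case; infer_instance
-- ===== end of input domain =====

-- B replaces A's count-table + filter + final sort by sorting the input once and scanning runs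
-- of equal values in one pass (alternative decomposition; return value only, no mutation).

-- ===== PORT A =====
def solve_test_case (N : Int) (cows : List Int) : List Int :=
  let hay_count : PySem.Dict Int Int :=
    cows.foldl (fun d hay =>
      if ¬ (d.contains hay = true) then d.insert hay 1
      else d.insert hay (d.getD hay 0 + 1)) PySem.Dict.empty
  let half_threshold : Int := PySem.Int.floordiv N 2 + 1
  let possible_hays : List Int :=
    hay_count.items.foldl (fun acc p => if half_threshold ≤ p.2 then acc ++ [p.1] else acc) []
  if possible_hays.length = 0 then [-1]
  else PySem.List.sorted possible_hays (fun x => x) false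

-- ===== PORT B =====
-- outer while-loop of Source B: each step consumes one maximal run of equal values
def runScan (thr : Int) : List Int → List Int
  | [] => []
  | x :: xs =>
    let run := xs.takeWhile (fun y => y == x)   -- inner while: j advances past equal values
    let rest := xs.dropWhile (fun y => y == x)
    (if thr ≤ 1 + (run.length : Int) then [x] else []) ++ runScan thr rest
termination_by l => l.length
decreasing_by
  simpa using Nat.lt_succ_of_le (xs.dropWhile_sublist (fun y => y == x)).length_le

def solve_test_case_alt (N : Int) (cows : List Int) : List Int :=
  let threshold : Int := PySem.Int.floordiv N 2 + 1
  let s := PySem.List.sorted cows (fun x => x) false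
  let result := runScan threshold s
  if result = [] then [-1] else result

-- ===== PRECONDITION & SPEC =====
def Spec_solve_test_case (N : Int) (cows : List Int) (out : List Int) : Prop := out = solve_test_case_alt N cows
instance (N : Int) (cows : List Int) (out : List Int) : Decidable (Spec_solve_test_case N cows out) := by unfold Spec_solve_test_case; infer_instance

-- ===== CLAIM (what is proved, stated in full; the proofs are below) =====
def Claim_equal_solve_test_case : Prop := ∀ (N : Int) (cows : List Int), Dom_solve_test_case N cows → Spec_solve_test_case N cows (solve_test_case N cows)

-- ===== LEMMAS AND PROOFS =====

lemma lt_of_mem_dropWhile_sorted {x : Int} {xs : List Int}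
    (h : (x :: xs).Pairwise (· ≤ ·)) :
    ∀ z ∈ xs.dropWhile (fun y => y == x), x < z := by
  induction xs with
  | nil => simp
  | cons y t ih =>
    rcases List.pairwise_cons.1 h with ⟨hx, hyt⟩
    rcases List.pairwise_cons.1 hyt with ⟨hy, ht⟩
    by_cases hyx : y = x
    · subst hyx
      simp only [List.dropWhile_cons, BEq.rfl, if_pos]
      exact ih (List.pairwise_cons.2 ⟨fun z hz => hx z (by simp [hz]), ht⟩)
    · intro z hz
      rw [List.dropWhile_cons] at hz
      simp only [beq_iff_eq, hyx, reduceIte] at hz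
      have hxy : x < y := lt_of_le_of_ne (hx y (by simp)) (Ne.symm hyx)
      rcases List.mem_cons.1 hz with rfl | hz
      · exact hxy
      · exact lt_of_lt_of_le hxy (hy z hz)

lemma count_head_sorted {x : Int} {xs : List Int}
    (h : (x :: xs).Pairwise (· ≤ ·)) :
    ((x :: xs).count x : Int) = 1 + ((xs.takeWhile (fun y => y == x)).length : Int) := by
  have hsplit := List.takeWhile_append_dropWhile (p := fun y => y == x) (l := xs)
  have h1 : (xs.takeWhile (fun y => y == x)).count x = (xs.takeWhile (fun y => y == x)).length := by
    apply List.count_eq_length.2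
    intro z hz
    exact (beq_iff_eq.1 (List.mem_takeWhile_imp (p := fun y => y == x) hz)).symm
  have h2 : (xs.dropWhile (fun y => y == x)).count x = 0 := by
    apply List.count_eq_zero.2
    intro hmem
    exact absurd rfl (ne_of_gt (lt_of_mem_dropWhile_sorted h x hmem))
  have : xs.count x = (xs.takeWhile (fun y => y == x)).length := by
    conv_lhs => rw [← hsplit]
    rw [List.count_append, h1, h2]
    omega
  rw [List.count_cons_self, this]
  push_cast
  ring

lemma count_rest_sorted {x v : Int} {xs : List Int} (hne : v ≠ x)
    (h : (x :: xs).Pairwise (· ≤ ·)) :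
    (x :: xs).count v = (xs.dropWhile (fun y => y == x)).count v := by
  have hsplit := List.takeWhile_append_dropWhile (p := fun y => y == x) (l := xs)
  have h1 : (xs.takeWhile (fun y => y == x)).count v = 0 := by
    apply List.count_eq_zero.2
    intro hmem
    have := List.mem_takeWhile_imp hmem
    exact hne (by simpa using this)
  rw [List.count_cons_of_ne hne.symm]
  conv_lhs => rw [← hsplit]
  rw [List.count_append, h1, Nat.zero_add]


lemma runScan_cons (thr x : Int) (xs : List Int) :
    runScan thr (x :: xs) =
      (if thr ≤ 1 + ((xs.takeWhile (fun y => y == x)).length : Int) then [x] else [])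
        ++ runScan thr (xs.dropWhile (fun y => y == x)) := by
  rw [runScan.eq_def]

lemma runScan_mem (thr : Int) (l : List Int) (h : l.Pairwise (· ≤ ·)) :
    ∀ v, v ∈ runScan thr l ↔ v ∈ l ∧ thr ≤ (l.count v : Int) := by
  induction l using runScan.induct with
  | case1 => simp [runScan]
  | case2 x xs rest ih =>
    intro v
    have hdrop := lt_of_mem_dropWhile_sorted h
    have hrest : (xs.dropWhile (fun y => y == x)).Pairwise (· ≤ ·) :=
      h.sublist ((xs.dropWhile_sublist (fun y => y == x)).trans (List.sublist_cons_self x xs))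
    rw [runScan_cons, List.mem_append, ih hrest v]
    by_cases hvx : v = x
    · subst hvx
      have hnot : ¬ (v ∈ xs.dropWhile (fun y => y == v)) :=
        fun hm => absurd rfl (ne_of_gt (hdrop v hm))
      rw [count_head_sorted h]
      constructor
      · rintro (hin | ⟨hm, _⟩)
        · refine ⟨List.mem_cons_self, ?_⟩
          by_contra hlt
          simp [if_neg hlt] at hin
        · exact absurd hm hnot
      · rintro ⟨_, hcnt⟩
        left; simp [if_pos hcnt]
    · rw [← count_rest_sorted hvx h]
      constructor
      · rintro (hin | ⟨hm, hcnt⟩)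
        · exfalso; rcases (by split_ifs at hin <;> simp_all : v = x) with rfl; exact hvx rfl
        · exact ⟨List.mem_cons_of_mem x ((xs.dropWhile_sublist _).mem hm), hcnt⟩
      · rintro ⟨hm, hcnt⟩
        right
        refine ⟨?_, hcnt⟩
        rcases List.mem_cons.1 hm with rfl | hm'
        · exact absurd rfl hvx
        · -- v ∈ xs and v ≠ x, so v survives the dropWhile
          have := List.takeWhile_append_dropWhile (p := fun y => y == x) (l := xs)
          rw [← this] at hm'
          rcases List.mem_append.1 hm' with hmt | hmd
          · exact absurd (beq_iff_eq.1 (List.mem_takeWhile_imp (p := fun y => y == x) hmt)) hvx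
          · exact hmd

lemma runScan_pairwise (thr : Int) (l : List Int) (h : l.Pairwise (· ≤ ·)) :
    (runScan thr l).Pairwise (· < ·) := by
  induction l using runScan.induct with
  | case1 => simp [runScan]
  | case2 x xs rest ih =>
    have hdrop := lt_of_mem_dropWhile_sorted h
    have hrest : (xs.dropWhile (fun y => y == x)).Pairwise (· ≤ ·) :=
      h.sublist ((xs.dropWhile_sublist (fun y => y == x)).trans (List.sublist_cons_self x xs))
    rw [runScan_cons]
    apply List.pairwise_append.2
    refine ⟨?_, ih hrest, ?_⟩
    · split_ifs <;> simp
    · intro a ha b hb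
      have hb' : b ∈ xs.dropWhile (fun y => y == x) := ((runScan_mem thr _ hrest b).1 hb).1
      have hax : a = x := by split_ifs at ha <;> simp_all
      rw [hax]
      exact hdrop b hb'

lemma step_eq_counter_step (d : PySem.Dict Int Int) (hay : Int) :
    (if ¬ (d.contains hay = true) then d.insert hay 1
     else d.insert hay (d.getD hay 0 + 1)) = d.modify hay 0 (· + 1) := by
  by_cases hc : d.contains hay = true
  · simp [hc, PySem.Dict.modify]
  · have : d.getD hay 0 = 0 := by
      simp [PySem.Dict.getD, (PySem.Dict.get?_eq_none_iff_contains d hay).2 (by simpa using hc)]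
    simp [hc, PySem.Dict.modify, this]

lemma dict_loop_eq_counter (cows : List Int) :
    cows.foldl (fun d hay =>
      if ¬ (d.contains hay = true) then d.insert hay 1
      else d.insert hay (d.getD hay 0 + 1)) PySem.Dict.empty = PySem.Dict.counter cows := by
  rw [PySem.Dict.counter_eq_foldl]
  exact PySem.List.foldl_congr_mem cows _ _ PySem.Dict.empty (fun d hay _ => step_eq_counter_step d hay)

lemma possible_eq (cows : List Int) (thr : Int) :
    (PySem.Dict.counter cows).items.foldl
        (fun acc p => if thr ≤ p.2 then acc ++ [p.1] else acc) [] =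
      (PySem.Set.ofList cows).filter (fun k => decide (thr ≤ (cows.count k : Int))) := by
  rw [PySem.Dict.items_counter, PySem.List.foldl_append_ite (p := fun p : Int × Int => thr ≤ p.2) (f := Prod.fst)]
  rw [List.filter_map, List.map_map]
  simp [Function.comp_def]

lemma sorted_possible_eq_runScan (cows : List Int) (thr : Int) :
    PySem.List.sorted
        ((PySem.Set.ofList cows).filter (fun k => decide (thr ≤ (cows.count k : Int))))
        (fun x => x) false
      = runScan thr (PySem.List.sorted cows (fun x => x) false) := by
  have hS : (PySem.List.sorted cows (fun x => x) false).Pairwise (· ≤ ·) :=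
    PySem.List.sorted_pairwise cows (fun x => x)
  have hmemR := runScan_mem thr _ hS
  have hpwR := runScan_pairwise thr _ hS
  have hcnt : ∀ v, (PySem.List.sorted cows (fun x => x) false).count v = cows.count v :=
    fun v => (PySem.List.sorted_perm cows (fun x => x) false).count_eq v
  have hperm : (runScan thr (PySem.List.sorted cows (fun x => x) false)).Perm
      ((PySem.Set.ofList cows).filter (fun k => decide (thr ≤ (cows.count k : Int)))) := by
    apply (List.perm_ext_iff_of_nodup (hpwR.imp ne_of_lt)
      ((PySem.Set.nodup_ofList cows).filter _)).2
    intro v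
    rw [hmemR v, List.mem_filter, PySem.List.mem_sorted, hcnt v]
    simp [PySem.Set.mem_ofList]
  exact PySem.List.sorted_eq_of_perm_of_pairwise_lt _ _ _ hperm hpwR

-- ===== VERDICT (by name: the statement is the Claim_ definition above) =====
theorem solve_test_case_spec : Claim_equal_solve_test_case := by
  intro N cows _
  unfold Spec_solve_test_case solve_test_case solve_test_case_alt
  rw [dict_loop_eq_counter]
  dsimp only
  rw [possible_eq]
  have E := sorted_possible_eq_runScan cows (PySem.Int.floordiv N 2 + 1)
  have hc : (((PySem.Set.ofList cows).filter
        (fun k => decide (PySem.Int.floordiv N 2 + 1 ≤ (cows.count k : Int)))).length = 0)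
      ↔ runScan (PySem.Int.floordiv N 2 + 1) (PySem.List.sorted cows (fun x => x) false) = [] := by
    rw [List.length_eq_zero_iff, ← E, PySem.List.sorted_eq_nil_iff]
  split_ifs with h1 h2
  · rfl
  · exact absurd (hc.1 h1) h2
  · exact absurd (hc.2 ‹_›) h1
  · exact E
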